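-- pv_equiv track=rewrite | github.com/Ivanyinfan/LeetCode | Google-3.py | solution
-- ===== SOURCE A (Python) =====
-- def solution(s:str) -> str:
--     pos_map = dict()
--     for i, char in enumerate(s): pos_map[char]=i
--     max_len, start, end = 1,0,0
--     for i, char in enumerate(s):
--         lenn = pos_map[char]-i+1
--         if lenn>max_len:
--             max_len, start, end = lenn, i, pos_map[char]
--     return s[start:end+1]
-- ===== SOURCE B (Python) =====
-- def solution(s: str) -> str:
--     first = {}
--     max_len, start, end = 1, 0, 0
--     for i, char in enumerate(s):
--         if char not in first:
--             first[char] = i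
--         length = i - first[char] + 1
--         if length > max_len:
--             max_len, start, end = length, first[char], i
--     return s[start:end + 1]
-- ===== Notes on version B (the rewrite author's own statement) =====
-- stated objective: alternative
-- what changed: Replaces A's two passes (precompute a last-occurrence table, then rescan every index computing last-i+1) with a single pass keeping a first-occurrence dict and finalising each span at its end index (length = i - first[char] + 1).
import Mathlib
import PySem

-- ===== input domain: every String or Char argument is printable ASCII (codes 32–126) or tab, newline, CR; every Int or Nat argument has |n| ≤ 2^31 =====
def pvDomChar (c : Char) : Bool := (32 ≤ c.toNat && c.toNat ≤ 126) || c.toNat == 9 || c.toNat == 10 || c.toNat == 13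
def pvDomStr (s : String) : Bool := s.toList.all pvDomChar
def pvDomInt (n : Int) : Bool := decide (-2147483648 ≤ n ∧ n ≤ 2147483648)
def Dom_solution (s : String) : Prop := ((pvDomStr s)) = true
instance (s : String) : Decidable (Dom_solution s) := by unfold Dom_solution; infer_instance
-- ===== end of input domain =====

-- B replaces A's two passes (last-occurrence table, then a rescan by start index) with one pass
-- tracking first occurrences and finalising each span at its end index; same results, same cost.

-- ===== PORT A =====
-- pos_map[char] always succeeds (char ∈ s), so the raising lookup is ported as getD _ 0.
def solution (s : String) : String :=
  let cs := s.toList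
  let posMap : PySem.Dict Char Int :=
    (PySem.List.enumerate cs 0).foldl (fun d p => d.insert p.2 p.1) PySem.Dict.empty
  let st : Int × Int × Int :=
    (PySem.List.enumerate cs 0).foldl
      (fun t p =>
        let lenn := posMap.getD p.2 0 - p.1 + 1
        if lenn > t.1 then (lenn, p.1, posMap.getD p.2 0) else t)
      (1, 0, 0)
  PySem.Str.slice s (some st.2.1) (some (st.2.2 + 1))

-- ===== PORT B =====
-- first[char] always succeeds after the conditional insert, so it is ported as getD _ 0.
def solution_alt (s : String) : String :=
  let cs := s.toList
  let r : PySem.Dict Char Int × (Int × Int × Int) :=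
    (PySem.List.enumerate cs 0).foldl
      (fun st p =>
        let d := if st.1.contains p.2 then st.1 else st.1.insert p.2 p.1
        let length := p.1 - d.getD p.2 0 + 1
        (d, if length > st.2.1 then (length, d.getD p.2 0, p.1) else st.2))
      (PySem.Dict.empty, (1, 0, 0))
  PySem.Str.slice s (some r.2.2.1) (some (r.2.2.2 + 1))

-- ===== PRECONDITION & SPEC =====
def Spec_solution (s : String) (out : String) : Prop := out = solution_alt s
instance (s : String) (out : String) : Decidable (Spec_solution s out) := by unfold Spec_solution; infer_instance

-- ===== CLAIM (what is proved, stated in full; the proofs are below) =====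
def Claim_equal_solution : Prop := ∀ (s : String), Dom_solution s → Spec_solution s (solution s)

-- ===== LEMMAS AND PROOFS =====

-- first / last occurrence of a char in a list (meaningful when the char occurs)
def pvFirstOcc : List Char → Char → Nat
  | [], _ => 0
  | x :: xs, c => if x = c then 0 else pvFirstOcc xs c + 1

def pvLastOcc : List Char → Char → Nat
  | [], _ => 0
  | _ :: xs, c => if c ∈ xs then pvLastOcc xs c + 1 else 0

def pvChAt (cs : List Char) (k : Nat) : Char := cs.getD k ' '

-- the running strict-max update both loops perform, and each loop's candidate triple
def pvUpd (t c : Int × Int × Int) : Int × Int × Int := if c.1 > t.1 then c else t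

def pvCandA (cs : List Char) (p : Int × Char) : Int × Int × Int :=
  ((pvLastOcc cs p.2 : Int) - p.1 + 1, p.1, (pvLastOcc cs p.2 : Int))

def pvCandB (cs : List Char) (p : Int × Char) : Int × Int × Int :=
  (p.1 - (pvFirstOcc cs p.2 : Int) + 1, (pvFirstOcc cs p.2 : Int), p.1)

-- candidate lengths, as naturals
def pvVA (cs : List Char) (k : Nat) : Nat := pvLastOcc cs (pvChAt cs k) + 1 - k
def pvVB (cs : List Char) (k : Nat) : Nat := k + 1 - pvFirstOcc cs (pvChAt cs k)

-- ---------- occurrence facts ----------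
lemma pvFirstOcc_lt {cs : List Char} {c : Char} (h : c ∈ cs) : pvFirstOcc cs c < cs.length := by
  induction cs with
  | nil => simp at h
  | cons x xs ih =>
    by_cases hx : x = c
    · simp [pvFirstOcc, hx]
    · have hc : c ∈ xs := by simp at h; tauto
      simp [pvFirstOcc, hx, Nat.succ_lt_succ (ih hc)]

lemma pvChAt_firstOcc {cs : List Char} {c : Char} (h : c ∈ cs) : pvChAt cs (pvFirstOcc cs c) = c := by
  induction cs with
  | nil => simp at h
  | cons x xs ih =>
    by_cases hx : x = c
    · simp [pvChAt, pvFirstOcc, hx]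
    · have hc : c ∈ xs := by simp at h; tauto
      simpa [pvChAt, pvFirstOcc, hx] using ih hc

lemma pvFirstOcc_le {cs : List Char} {k : Nat} (h : k < cs.length) :
    pvFirstOcc cs (pvChAt cs k) ≤ k := by
  induction cs generalizing k with
  | nil => simp at h
  | cons x xs ih =>
    cases k with
    | zero => simp [pvChAt, pvFirstOcc]
    | succ n =>
      have hn : n < xs.length := by simpa using h
      by_cases hx : x = pvChAt (x :: xs) (n+1)
      · simp only [pvFirstOcc, if_pos hx]; omega
      · have : pvChAt (x :: xs) (n+1) = pvChAt xs n := by simp [pvChAt]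
        rw [this] at hx ⊢
        simp only [pvFirstOcc, if_neg hx]
        exact Nat.succ_le_succ (ih hn)

lemma pvLastOcc_lt {cs : List Char} {c : Char} (h : c ∈ cs) : pvLastOcc cs c < cs.length := by
  induction cs with
  | nil => simp at h
  | cons x xs ih =>
    by_cases hc : c ∈ xs
    · simp [pvLastOcc, hc, Nat.succ_lt_succ (ih hc)]
    · simp [pvLastOcc, hc]

lemma pvChAt_lastOcc {cs : List Char} {c : Char} (h : c ∈ cs) : pvChAt cs (pvLastOcc cs c) = c := by
  induction cs with
  | nil => simp at h
  | cons x xs ih =>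
    by_cases hc : c ∈ xs
    · simpa [pvChAt, pvLastOcc, hc] using ih hc
    · have hx : x = c := by simp at h; tauto
      simp [pvChAt, pvLastOcc, hc, hx]

lemma pvChAt_mem {cs : List Char} {k : Nat} (h : k < cs.length) : pvChAt cs k ∈ cs := by
  simp only [pvChAt, List.getD, List.getElem?_eq_getElem h, Option.getD_some]
  exact List.getElem_mem h

lemma pvLe_lastOcc {cs : List Char} {k : Nat} (h : k < cs.length) :
    k ≤ pvLastOcc cs (pvChAt cs k) := by
  induction cs generalizing k with
  | nil => simp at h
  | cons x xs ih =>
    cases k with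
    | zero => simp
    | succ n =>
      have hn : n < xs.length := by simpa using h
      have hmem : pvChAt xs n ∈ xs := pvChAt_mem hn
      have : pvChAt (x :: xs) (n+1) = pvChAt xs n := by simp [pvChAt]
      rw [this]
      simp only [pvLastOcc, if_pos hmem]
      exact Nat.succ_le_succ (ih hn)

lemma pvFirstOcc_append_left {cs : List Char} {c : Char} (h : c ∈ cs) (t : List Char) :
    pvFirstOcc (cs ++ t) c = pvFirstOcc cs c := by
  induction cs with
  | nil => simp at h
  | cons x xs ih =>
    by_cases hx : x = c
    · simp [pvFirstOcc, hx]
    · have hc : c ∈ xs := by simp at h; tauto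
      simp [pvFirstOcc, hx, ih hc]

lemma pvFirstOcc_append_self {cs : List Char} {x : Char} (h : x ∉ cs) :
    pvFirstOcc (cs ++ [x]) x = cs.length := by
  induction cs with
  | nil => simp [pvFirstOcc]
  | cons y ys ih =>
    have hy : y ≠ x := by intro e; exact h (e ▸ List.mem_cons_self)
    have : x ∉ ys := fun hm => h (List.mem_cons_of_mem _ hm)
    simp [pvFirstOcc, hy, ih this]

lemma pvEnum_getElem? (cs : List Char) (s : Int) (k : Nat) (h : k < cs.length) :
    (PySem.List.enumerate cs s)[k]? = some (s + k, cs[k]) := by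
  induction cs generalizing s k with
  | nil => simp at h
  | cons x xs ih =>
    rw [PySem.List.enumerate_cons]
    cases k with
    | zero => simp
    | succ n =>
      have hn : n < xs.length := by simpa using h
      simp only [List.getElem?_cons_succ, ih (s+1) n hn, List.getElem_cons_succ]
      congr 2
      push_cast; ring

lemma pvEnum_getElem (cs : List Char) (s : Int) (k : Nat) (h : k < cs.length)
    (h' : k < (PySem.List.enumerate cs s).length) :
    (PySem.List.enumerate cs s)[k] = (s + k, cs[k]) := by
  have := pvEnum_getElem? cs s k h
  rw [List.getElem?_eq_getElem h'] at this
  exact Option.some.inj this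

lemma pvDictA (cs : List Char) : ∀ (s : Int) (d : PySem.Dict Char Int) (c : Char),
    ((PySem.List.enumerate cs s).foldl (fun d p => d.insert p.2 p.1) d).getD c 0
      = if c ∈ cs then s + (pvLastOcc cs c : Int) else d.getD c 0 := by
  induction cs with
  | nil => intro s d c; simp
  | cons x xs ih =>
    intro s d c
    rw [PySem.List.enumerate_cons]
    simp only [List.foldl_cons]
    rw [ih (s+1) (d.insert x s) c]
    by_cases hc : c ∈ xs
    · simp only [pvLastOcc, if_pos hc, if_pos (List.mem_cons_of_mem x hc)]
      push_cast; ring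
    · by_cases hx : c = x
      · subst hx
        simp only [if_neg hc, pvLastOcc, PySem.Dict.getD_insert_self]
        simp [hc]
      · simp only [if_neg hc]
        rw [PySem.Dict.getD_insert_of_ne]
        · simp [hc, hx]
        · exact fun e => hx e

-- ---------- A's scan is the fold of pvUpd over its candidates ----------
lemma pvAfold (cs : List Char) :
    (PySem.List.enumerate cs 0).foldl
      (fun t p =>
        let posMap := (PySem.List.enumerate cs 0).foldl (fun d p => d.insert p.2 p.1) PySem.Dict.empty
        let lenn := posMap.getD p.2 0 - p.1 + 1
        if lenn > t.1 then (lenn, p.1, posMap.getD p.2 0) else t)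
      (1, 0, 0)
    = ((PySem.List.enumerate cs 0).map (pvCandA cs)).foldl pvUpd (1, 0, 0) := by
  rw [List.foldl_map]
  apply PySem.List.foldl_congr_mem
  intro acc p hp
  have hmem : p.2 ∈ cs := by
    rw [← PySem.List.map_snd_enumerate cs 0]
    exact List.mem_map_of_mem hp
  simp only [pvDictA cs 0 PySem.Dict.empty p.2, if_pos hmem, pvUpd, pvCandA, zero_add]

-- ---------- B's scan is the fold of pvUpd over its candidates ----------
lemma pvBfold_aux (cs : List Char) : ∀ (suf pre : List Char) (d : PySem.Dict Char Int)
    (t : Int × Int × Int), cs = pre ++ suf →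
    (∀ c : Char, d.get? c = if c ∈ pre then some ((pvFirstOcc pre c : Nat) : Int) else none) →
    ((PySem.List.enumerate suf (pre.length : Int)).foldl
      (fun st p =>
        let d := if st.1.contains p.2 then st.1 else st.1.insert p.2 p.1
        let length := p.1 - d.getD p.2 0 + 1
        (d, if length > st.2.1 then (length, d.getD p.2 0, p.1) else st.2))
      (d, t)).2
    = (PySem.List.enumerate suf (pre.length : Int)).foldl (fun t p => pvUpd t (pvCandB cs p)) t := by
  intro suf
  induction suf with
  | nil => intro pre d t hcs hinv; simp [PySem.List.enumerate_nil]
  | cons x xs ih =>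
    intro pre d t hcs hinv
    rw [PySem.List.enumerate_cons]
    simp only [List.foldl_cons]
    have hcont : d.contains x = decide (x ∈ pre) := by
      rw [PySem.Dict.contains_eq_isSome_get?, hinv x]
      by_cases hx : x ∈ pre <;> simp [hx]
    have hlen : ((pre ++ [x]).length : Int) = (pre.length : Int) + 1 := by simp
    by_cases hx : x ∈ pre
    · -- char already seen: dict unchanged
      have hc' : d.contains x = true := by rw [hcont]; exact decide_eq_true hx
      have hfo : pvFirstOcc cs x = pvFirstOcc pre x := by
        rw [hcs]; exact pvFirstOcc_append_left hx _
      have hget : d.getD x 0 = ((pvFirstOcc pre x : Nat) : Int) := by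
        rw [PySem.Dict.getD_eq_get?_getD, hinv x, if_pos hx]; rfl
      have hinv' : ∀ c : Char, d.get? c =
          if c ∈ pre ++ [x] then some ((pvFirstOcc (pre ++ [x]) c : Nat) : Int) else none := by
        intro c
        rw [hinv c]
        by_cases hc : c ∈ pre
        · rw [if_pos hc, if_pos (List.mem_append_left _ hc), pvFirstOcc_append_left hc]
        · have hno : c ∉ pre ++ [x] := by
            simp only [List.mem_append, List.mem_singleton]
            rintro (h | rfl) <;> [exact hc h; exact hc hx]
          rw [if_neg hc, if_neg hno]
      have hsel : (if d.contains x then d else d.insert x (pre.length : Int)) = d := if_pos hc'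
      have hstep :
          ((if d.contains x then d else d.insert x (pre.length : Int)),
            (if (pre.length : Int) -
                  (if d.contains x then d else d.insert x (pre.length : Int)).getD x 0 + 1 > t.1
              then ((pre.length : Int) -
                      (if d.contains x then d else d.insert x (pre.length : Int)).getD x 0 + 1,
                    (if d.contains x then d else d.insert x (pre.length : Int)).getD x 0,
                    (pre.length : Int))
              else t))
          = (d, pvUpd t (pvCandB cs ((pre.length : Int), x))) := by
        rw [hsel, hget]
        simp only [pvUpd, pvCandB, hfo]
      rw [hstep]
      have := ih (pre ++ [x]) d (pvUpd t (pvCandB cs ((pre.length : Int), x)))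
        (by rw [hcs, List.append_cons]) hinv'
      rw [hlen] at this
      exact this
    · -- new char: insert its first position
      have hc' : d.contains x = false := by rw [hcont]; exact decide_eq_false hx
      have hfo : pvFirstOcc cs x = pre.length := by
        rw [hcs, List.append_cons,
          pvFirstOcc_append_left (List.mem_append_right pre List.mem_cons_self) xs]
        exact pvFirstOcc_append_self hx
      have hinv' : ∀ c : Char, (d.insert x (pre.length : Int)).get? c =
          if c ∈ pre ++ [x] then some ((pvFirstOcc (pre ++ [x]) c : Nat) : Int) else none := by
        intro c
        rw [PySem.Dict.get?_insert]
        by_cases hcx : c = x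
        · subst hcx
          rw [if_pos rfl, if_pos (List.mem_append_right pre List.mem_cons_self),
            pvFirstOcc_append_self hx]
        · rw [if_neg hcx, hinv c]
          by_cases hc : c ∈ pre
          · rw [if_pos hc, if_pos (List.mem_append_left _ hc), pvFirstOcc_append_left hc]
          · have hno : c ∉ pre ++ [x] := by
              simp only [List.mem_append, List.mem_singleton]
              rintro (h | rfl) <;> [exact hc h; exact hcx rfl]
            rw [if_neg hc, if_neg hno]
      have hsel : (if d.contains x then d else d.insert x (pre.length : Int))
          = d.insert x (pre.length : Int) := if_neg (by simp [hc'])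
      have hget : (d.insert x (pre.length : Int)).getD x 0 = ((pre.length : Nat) : Int) :=
        PySem.Dict.getD_insert_self d x _ 0
      have hstep :
          ((if d.contains x then d else d.insert x (pre.length : Int)),
            (if (pre.length : Int) -
                  (if d.contains x then d else d.insert x (pre.length : Int)).getD x 0 + 1 > t.1
              then ((pre.length : Int) -
                      (if d.contains x then d else d.insert x (pre.length : Int)).getD x 0 + 1,
                    (if d.contains x then d else d.insert x (pre.length : Int)).getD x 0,
                    (pre.length : Int))
              else t))
          = (d.insert x (pre.length : Int), pvUpd t (pvCandB cs ((pre.length : Int), x))) := by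
        rw [hsel, hget]
        simp only [pvUpd, pvCandB, hfo]
      rw [hstep]
      have := ih (pre ++ [x]) (d.insert x (pre.length : Int))
        (pvUpd t (pvCandB cs ((pre.length : Int), x)))
        (by rw [hcs, List.append_cons]) hinv'
      rw [hlen] at this
      exact this

lemma pvBfold (cs : List Char) :
    ((PySem.List.enumerate cs 0).foldl
      (fun st p =>
        let d := if st.1.contains p.2 then st.1 else st.1.insert p.2 p.1
        let length := p.1 - d.getD p.2 0 + 1
        (d, if length > st.2.1 then (length, d.getD p.2 0, p.1) else st.2))
      (PySem.Dict.empty, (1, 0, 0))).2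
    = ((PySem.List.enumerate cs 0).map (pvCandB cs)).foldl pvUpd (1, 0, 0) := by
  have := pvBfold_aux cs cs [] PySem.Dict.empty (1, 0, 0) (by simp) (by intro c; simp)
  simp only [List.length_nil, Int.natCast_zero] at this
  rw [this, List.foldl_map]

-- ---------- generic facts about folding pvUpd ----------
lemma pvUpd_all_le (l : List (Int × Int × Int)) (t : Int × Int × Int)
    (h : ∀ c ∈ l, c.1 ≤ t.1) : l.foldl pvUpd t = t := by
  induction l with
  | nil => rfl
  | cons c l ih =>
    have hc : c.1 ≤ t.1 := h c List.mem_cons_self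
    simp only [List.foldl_cons, pvUpd, if_neg (by omega : ¬ c.1 > t.1)]
    exact ih fun c' hc' => h c' (List.mem_cons_of_mem _ hc')

lemma pvUpd_fst_lt (l : List (Int × Int × Int)) (t : Int × Int × Int) (B : Int)
    (ht : t.1 < B) (h : ∀ c ∈ l, c.1 < B) : (l.foldl pvUpd t).1 < B := by
  induction l generalizing t with
  | nil => exact ht
  | cons c l ih =>
    simp only [List.foldl_cons, pvUpd]
    split
    · exact ih c (h c List.mem_cons_self) fun c' hc' => h c' (List.mem_cons_of_mem _ hc')
    · exact ih t ht fun c' hc' => h c' (List.mem_cons_of_mem _ hc')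

lemma pvUpd_first_achiever (l1 l2 : List (Int × Int × Int)) (c t : Int × Int × Int)
    (h1 : ∀ c' ∈ l1, c'.1 < c.1) (h2 : ∀ c' ∈ l2, c'.1 ≤ c.1) (ht : t.1 < c.1) :
    (l1 ++ c :: l2).foldl pvUpd t = c := by
  rw [List.foldl_append, List.foldl_cons]
  have hlt := pvUpd_fst_lt l1 t c.1 ht h1
  rw [show pvUpd (l1.foldl pvUpd t) c = c by simp [pvUpd]; omega]
  exact pvUpd_all_le l2 c h2

-- ---------- small access lemmas ----------
lemma pvChAt_eq {cs : List Char} {k : Nat} (h : k < cs.length) : pvChAt cs k = cs[k] := by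
  simp only [pvChAt, List.getD_eq_getElem cs ' ' h]

lemma pvMapEnum_length {α : Type} (f : Int × Char → α) (cs : List Char) :
    ((PySem.List.enumerate cs 0).map f).length = cs.length := by
  simp [PySem.List.length_enumerate]

lemma pvMapEnum_getElem {α : Type} (f : Int × Char → α) (cs : List Char) (k : Nat)
    (h : k < cs.length) (h' : k < ((PySem.List.enumerate cs 0).map f).length) :
    ((PySem.List.enumerate cs 0).map f)[k] = f ((k : Int), cs[k]) := by
  have he : k < (PySem.List.enumerate cs 0).length := by
    simpa [PySem.List.length_enumerate] using h
  rw [List.getElem_map, pvEnum_getElem cs 0 k h he, zero_add]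

lemma pvMemMapEnum {α : Type} {f : Int × Char → α} {cs : List Char} {x : α}
    (hx : x ∈ (PySem.List.enumerate cs 0).map f) :
    ∃ k, ∃ h : k < cs.length, x = f ((k : Int), cs[k]) := by
  rcases List.mem_iff_getElem.mp hx with ⟨k, hk, hv⟩
  have h : k < cs.length := by rwa [pvMapEnum_length] at hk
  exact ⟨k, h, by rw [← hv, pvMapEnum_getElem f cs k h hk]⟩

-- ---------- foldr max facts ----------
lemma pvLe_foldr_max {l : List Nat} {a b : Nat} (h : b ∈ l) : b ≤ l.foldr max a := by
  induction l with
  | nil => simp at h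
  | cons x xs ih =>
    rcases List.mem_cons.mp h with rfl | h'
    · exact le_max_left _ _
    · exact le_trans (ih h') (le_max_right _ _)

lemma pvFoldr_max_cases (l : List Nat) (a : Nat) : l.foldr max a = a ∨ l.foldr max a ∈ l := by
  induction l with
  | nil => left; rfl
  | cons x xs ih =>
    simp only [List.foldr_cons]
    rcases Nat.le_total x (xs.foldr max a) with h | h
    · rw [max_eq_right h]
      rcases ih with h' | h'
      · left; exact h'
      · right; exact List.mem_cons_of_mem _ h'
    · rw [max_eq_left h]; right; exact List.mem_cons_self

-- ---------- the maximal span and candidate-length bounds ----------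
def pvM (cs : List Char) : Nat := ((List.range cs.length).map (pvVA cs)).foldr max 1

lemma pvVA_le {cs : List Char} {k : Nat} (h : k < cs.length) : pvVA cs k ≤ pvM cs :=
  pvLe_foldr_max (List.mem_map_of_mem (List.mem_range.mpr h))

lemma pvVB_le {cs : List Char} {k : Nat} (h : k < cs.length) : pvVB cs k ≤ pvM cs := by
  have hmem : pvChAt cs k ∈ cs := pvChAt_mem h
  have hfn : pvFirstOcc cs (pvChAt cs k) < cs.length := pvFirstOcc_lt hmem
  have hch : pvChAt cs (pvFirstOcc cs (pvChAt cs k)) = pvChAt cs k := pvChAt_firstOcc hmem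
  have hva : pvVA cs (pvFirstOcc cs (pvChAt cs k))
      = pvLastOcc cs (pvChAt cs k) + 1 - pvFirstOcc cs (pvChAt cs k) := by
    unfold pvVA; rw [hch]
  have h1 := pvVA_le hfn
  have h2 : k ≤ pvLastOcc cs (pvChAt cs k) := pvLe_lastOcc h
  have h3 : pvFirstOcc cs (pvChAt cs k) ≤ k := pvFirstOcc_le h
  unfold pvVB; omega

lemma pvCandA_fst {cs : List Char} {k : Nat} (h : k < cs.length) :
    (pvCandA cs ((k : Int), cs[k])).1 = ((pvVA cs k : Nat) : Int) := by
  have h1 : k ≤ pvLastOcc cs (pvChAt cs k) := pvLe_lastOcc h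
  simp only [pvCandA, pvVA, ← pvChAt_eq h]
  omega

lemma pvCandB_fst {cs : List Char} {k : Nat} (h : k < cs.length) :
    (pvCandB cs ((k : Int), cs[k])).1 = ((pvVB cs k : Nat) : Int) := by
  have h1 : pvFirstOcc cs (pvChAt cs k) ≤ k := pvFirstOcc_le h
  simp only [pvCandB, pvVB, ← pvChAt_eq h]
  omega

-- ---------- the combinatorial core: both folds produce the same state ----------
lemma pvStates_eq (cs : List Char) :
    ((PySem.List.enumerate cs 0).map (pvCandA cs)).foldl pvUpd (1, 0, 0)
      = ((PySem.List.enumerate cs 0).map (pvCandB cs)).foldl pvUpd (1, 0, 0) := by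
  by_cases hM : pvM cs ≤ 1
  · -- no repeated character spans: both scans never update
    rw [pvUpd_all_le, pvUpd_all_le]
    · intro x hx
      rcases pvMemMapEnum hx with ⟨k, hk, rfl⟩
      rw [pvCandB_fst hk]
      have := pvVB_le hk
      show ((pvVB cs k : Nat) : Int) ≤ 1
      omega
    · intro x hx
      rcases pvMemMapEnum hx with ⟨k, hk, rfl⟩
      rw [pvCandA_fst hk]
      have := pvVA_le hk
      show ((pvVA cs k : Nat) : Int) ≤ 1
      omega
  · -- some character repeats: both scans settle on the same maximal span
    have hM2 : 2 ≤ pvM cs := by omega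
    have hex : ∃ k, k < cs.length ∧ pvVA cs k = pvM cs := by
      rcases pvFoldr_max_cases ((List.range cs.length).map (pvVA cs)) 1 with h | h
      · exact absurd h (by unfold pvM at hM2; omega)
      · rcases List.mem_map.mp h with ⟨k, hk, hvk⟩
        exact ⟨k, List.mem_range.mp hk, hvk⟩
    set i := Nat.find hex with hidef
    have hi : i < cs.length := (Nat.find_spec hex).1
    have hvi : pvVA cs i = pvM cs := (Nat.find_spec hex).2
    have hcmem : pvChAt cs i ∈ cs := pvChAt_mem hi
    have hvi' : pvLastOcc cs (pvChAt cs i) + 1 - i = pvM cs := hvi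
    have hij : i ≤ pvLastOcc cs (pvChAt cs i) := pvLe_lastOcc hi
    have hjn : pvLastOcc cs (pvChAt cs i) < cs.length := pvLastOcc_lt hcmem
    have hfn : pvFirstOcc cs (pvChAt cs i) < cs.length := pvFirstOcc_lt hcmem
    have hfi : pvFirstOcc cs (pvChAt cs i) ≤ i := pvFirstOcc_le hi
    have hchf : pvChAt cs (pvFirstOcc cs (pvChAt cs i)) = pvChAt cs i := pvChAt_firstOcc hcmem
    have hchj : pvChAt cs (pvLastOcc cs (pvChAt cs i)) = pvChAt cs i := pvChAt_lastOcc hcmem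
    have hvaf : pvVA cs (pvFirstOcc cs (pvChAt cs i)) = pvM cs := by
      have h1 : pvVA cs (pvFirstOcc cs (pvChAt cs i))
          = pvLastOcc cs (pvChAt cs i) + 1 - pvFirstOcc cs (pvChAt cs i) := by
        unfold pvVA; rw [hchf]
      have h2 := pvVA_le hfn
      omega
    have hif : i = pvFirstOcc cs (pvChAt cs i) :=
      le_antisymm (Nat.find_min' hex ⟨hfn, hvaf⟩) hfi
    -- below the last occurrence of the chosen char, B's candidate lengths stay short
    have hBlt : ∀ k, k < pvLastOcc cs (pvChAt cs i) → k < cs.length → pvVB cs k < pvM cs := by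
      intro k hkj hkn
      have hle := pvVB_le hkn
      by_contra hcon
      have hvbk : pvVB cs k = pvM cs := by omega
      have hkmem : pvChAt cs k ∈ cs := pvChAt_mem hkn
      have hfkn : pvFirstOcc cs (pvChAt cs k) < cs.length := pvFirstOcc_lt hkmem
      have hfk : pvFirstOcc cs (pvChAt cs k) ≤ k := pvFirstOcc_le hkn
      have hkL : k ≤ pvLastOcc cs (pvChAt cs k) := pvLe_lastOcc hkn
      have hchfk : pvChAt cs (pvFirstOcc cs (pvChAt cs k)) = pvChAt cs k := pvChAt_firstOcc hkmem
      have hvafk : pvVA cs (pvFirstOcc cs (pvChAt cs k))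
          = pvLastOcc cs (pvChAt cs k) + 1 - pvFirstOcc cs (pvChAt cs k) := by
        unfold pvVA; rw [hchfk]
      have hvafk_le := pvVA_le hfkn
      have hvbk' : k + 1 - pvFirstOcc cs (pvChAt cs k) = pvM cs := hvbk
      have hvafkM : pvVA cs (pvFirstOcc cs (pvChAt cs k)) = pvM cs := by omega
      have hik : i ≤ pvFirstOcc cs (pvChAt cs k) := Nat.find_min' hex ⟨hfkn, hvafkM⟩
      omega
    -- split each candidate list at its unique first maximal entry
    have hlA : i < ((PySem.List.enumerate cs 0).map (pvCandA cs)).length := by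
      rwa [pvMapEnum_length]
    have hlB : pvLastOcc cs (pvChAt cs i)
        < ((PySem.List.enumerate cs 0).map (pvCandB cs)).length := by
      rwa [pvMapEnum_length]
    rw [show (PySem.List.enumerate cs 0).map (pvCandA cs)
        = (((PySem.List.enumerate cs 0).map (pvCandA cs)).take i ++
          ((PySem.List.enumerate cs 0).map (pvCandA cs))[i] ::
          ((PySem.List.enumerate cs 0).map (pvCandA cs)).drop (i+1)) by
        rw [← List.drop_eq_getElem_cons hlA, List.take_append_drop]]
    rw [show (PySem.List.enumerate cs 0).map (pvCandB cs)
        = (((PySem.List.enumerate cs 0).map (pvCandB cs)).take (pvLastOcc cs (pvChAt cs i)) ++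
          ((PySem.List.enumerate cs 0).map (pvCandB cs))[pvLastOcc cs (pvChAt cs i)] ::
          ((PySem.List.enumerate cs 0).map (pvCandB cs)).drop (pvLastOcc cs (pvChAt cs i) + 1)) by
        rw [← List.drop_eq_getElem_cons hlB, List.take_append_drop]]
    have hgA : ((PySem.List.enumerate cs 0).map (pvCandA cs))[i]
        = ((pvM cs : Int), (i : Int), ((pvLastOcc cs (pvChAt cs i) : Nat) : Int)) := by
      rw [pvMapEnum_getElem _ cs i hi hlA]
      simp only [pvCandA, ← pvChAt_eq hi]
      have : (pvLastOcc cs (pvChAt cs i) : Int) - i + 1 = (pvM cs : Int) := by omega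
      rw [this]
    have hgB : ((PySem.List.enumerate cs 0).map (pvCandB cs))[pvLastOcc cs (pvChAt cs i)]
        = ((pvM cs : Int), (i : Int), ((pvLastOcc cs (pvChAt cs i) : Nat) : Int)) := by
      rw [pvMapEnum_getElem _ cs _ hjn hlB]
      simp only [pvCandB, ← pvChAt_eq hjn, hchj, ← hif]
      have : (pvLastOcc cs (pvChAt cs i) : Int) - i + 1 = (pvM cs : Int) := by omega
      rw [this]
    rw [hgA, hgB]
    refine Eq.trans (pvUpd_first_achiever _ _ _ _ ?_ ?_ ?_)
      (Eq.symm (pvUpd_first_achiever _ _ _ _ ?_ ?_ ?_))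
    · -- A's prefix: strictly shorter candidates
      intro x hx
      rcases List.mem_take_iff_getElem.mp hx with ⟨k, hk, hv⟩
      have hki : k < i := Nat.lt_of_lt_of_le hk (min_le_left _ _)
      have hkn : k < cs.length := by
        have := Nat.lt_of_lt_of_le hk (min_le_right _ _)
        rwa [pvMapEnum_length] at this
      rw [← hv, pvMapEnum_getElem _ cs k hkn (by rwa [pvMapEnum_length]), pvCandA_fst hkn]
      have h1 := pvVA_le hkn
      have h2 : ¬ (k < cs.length ∧ pvVA cs k = pvM cs) := Nat.find_min hex hki
      show ((pvVA cs k : Nat) : Int) < ((pvM cs : Nat) : Int)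
      omega
    · -- A's suffix: no strictly longer candidate
      intro x hx
      rcases pvMemMapEnum (List.mem_of_mem_drop hx) with ⟨k, hkn, rfl⟩
      rw [pvCandA_fst hkn]
      have h1 := pvVA_le hkn
      show ((pvVA cs k : Nat) : Int) ≤ ((pvM cs : Nat) : Int)
      omega
    · show (1 : Int) < ((pvM cs : Nat) : Int)
      omega
    · -- B's prefix: strictly shorter candidates
      intro x hx
      rcases List.mem_take_iff_getElem.mp hx with ⟨k, hk, hv⟩
      have hkj : k < pvLastOcc cs (pvChAt cs i) := Nat.lt_of_lt_of_le hk (min_le_left _ _)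
      have hkn : k < cs.length := by
        have := Nat.lt_of_lt_of_le hk (min_le_right _ _)
        rwa [pvMapEnum_length] at this
      rw [← hv, pvMapEnum_getElem _ cs k hkn (by rwa [pvMapEnum_length]), pvCandB_fst hkn]
      have h1 := hBlt k hkj hkn
      show ((pvVB cs k : Nat) : Int) < ((pvM cs : Nat) : Int)
      omega
    · -- B's suffix: no strictly longer candidate
      intro x hx
      rcases pvMemMapEnum (List.mem_of_mem_drop hx) with ⟨k, hkn, rfl⟩
      rw [pvCandB_fst hkn]
      have h1 := pvVB_le hkn
      show ((pvVB cs k : Nat) : Int) ≤ ((pvM cs : Nat) : Int)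
      omega
    · show (1 : Int) < ((pvM cs : Nat) : Int)
      omega

-- ===== VERDICT (by name: the statement is the Claim_ definition above) =====
theorem solution_spec : Claim_equal_solution := by
  intro s _
  unfold Spec_solution solution solution_alt
  simp only
  rw [pvAfold s.toList, pvBfold s.toList, pvStates_eq s.toList]
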